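-- pv_equiv track=rewrite | github.com/ASTRO-EDU/ASTROGAM-PIPE | function.py | index_uniq
-- ===== SOURCE A (Python) =====
-- def index_uniq(a):							#
-- 									#
-- 	a_index = []							#
-- 									#
-- 	for b in range(len(a)):						#
-- 		a_index_old = b						#
-- 		a_index.append(a_index_old)				#
-- 									#
-- 	a_uniq_index = []						#
-- 									#
-- 	b = 1								#
-- 	while b < len(a):						#
-- 									#
-- 		if a[b] != a[b-1]:					#
-- 			a_uniq_index.append(a_index[b-1])		#
-- 									#
-- 		if b == len(a)-1:					#
-- 			a_uniq_index.append(a_index[b])			#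
-- 									#
-- 		b = b + 1						#
-- 									#
-- 	return(a_uniq_index)						#
-- ===== SOURCE B (Python) =====
-- def index_uniq(a):
--     # Run-skipping scan: for each run of equal values, record its last index.
--     # Intended difference: for a single-element list A returns [] (its while
--     # loop never runs); B returns [0], the end of the one run.
--     res = []
--     i = 0
--     n = len(a)
--     while i < n:
--         j = i
--         while j + 1 < n and a[j + 1] == a[j]:
--             j += 1
--         res.append(j)
--         i = j + 1
--     return res
-- ===== Notes on version B (the rewrite author's own statement) =====
-- stated objective: simpler
-- what changed: B replaces A's redundant identity index list plus adjacent-pair while scan by a direct run-skipping scan (inner loop advances to each run's last index), with no auxiliary index list.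
-- intended difference: On single-element lists A returns [] because its while loop starting at b=1 never runs, while B returns [0], the last index of the only run, which is the intended end-of-run answer. — e.g. on index_uniq([5]): A returns [], B returns [0]
import Mathlib
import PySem

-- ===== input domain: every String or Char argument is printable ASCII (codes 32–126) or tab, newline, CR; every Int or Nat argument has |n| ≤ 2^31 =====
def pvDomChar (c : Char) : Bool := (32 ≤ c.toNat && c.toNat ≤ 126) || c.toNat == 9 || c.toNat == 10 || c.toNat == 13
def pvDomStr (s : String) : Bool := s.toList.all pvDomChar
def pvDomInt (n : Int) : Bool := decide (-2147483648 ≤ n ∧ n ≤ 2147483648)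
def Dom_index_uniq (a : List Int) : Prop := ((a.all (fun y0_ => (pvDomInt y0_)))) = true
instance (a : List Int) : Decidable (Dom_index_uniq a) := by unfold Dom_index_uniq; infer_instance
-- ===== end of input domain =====

-- B is a run-skipping scan recording each run's last index (no auxiliary index list);
-- on single-element lists B returns [0] (the intended run end) where A returns [].

-- ===== PORT A =====
-- the while loop of A, counter b starting at 1; a fuel argument (one unit per
-- iteration, a.length suffices) makes the recursion structural; indices are in
-- range so pyGetD is exact
def loopA (a idx : List Int) (fuel b : Nat) (acc : List Int) : List Int :=
  match fuel with
  | 0 => acc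
  | fuel' + 1 =>
    if b < a.length then
      let acc1 := if PySem.List.pyGetD a (b : Int) 0 ≠ PySem.List.pyGetD a ((b : Int) - 1) 0
                  then acc ++ [PySem.List.pyGetD idx ((b : Int) - 1) 0] else acc
      let acc2 := if b = a.length - 1
                  then acc1 ++ [PySem.List.pyGetD idx (b : Int) 0] else acc1
      loopA a idx fuel' (b + 1) acc2
    else acc

def index_uniq (a : List Int) : List Int :=
  -- a_index = [b for b in range(len(a))]
  let a_index := (PySem.List.pyRange 0 (a.length : Int) 1).foldl (fun acc b => acc ++ [b]) []
  loopA a a_index a.length 1 []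

-- ===== PORT B =====
-- inner while loop of B: advance j to the last index of the run starting at j
-- (fuel-guarded structural recursion; a.length units always suffice)
def runEnd (a : List Int) (fuel j : Nat) : Nat :=
  match fuel with
  | 0 => j
  | fuel' + 1 =>
    if j + 1 < a.length ∧ a.getD (j + 1) 0 = a.getD j 0 then runEnd a fuel' (j + 1) else j

-- outer while loop of B (i strictly increases, so a.length units of fuel suffice)
def loopB (a : List Int) (fuel i : Nat) : List Int :=
  match fuel with
  | 0 => []
  | fuel' + 1 =>
    if i < a.length then
      (Int.ofNat (runEnd a a.length i)) :: loopB a fuel' (runEnd a a.length i + 1)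
    else []

def index_uniq_alt (a : List Int) : List Int := loopB a a.length 0

-- ===== PRECONDITION & SPEC =====
-- On single-element lists A returns [] (its while loop starting at b=1 never runs)
-- while B returns [0], the last index of the only run — the intended end-of-run answer.
def D_index_uniq (a : List Int) : Prop := a.length = 1
instance (a : List Int) : Decidable (D_index_uniq a) := by unfold D_index_uniq; infer_instance

def Spec_index_uniq (a : List Int) (out : List Int) : Prop := ¬ D_index_uniq a → out = index_uniq_alt a
instance (a : List Int) (out : List Int) : Decidable (Spec_index_uniq a out) := by unfold Spec_index_uniq; infer_instance

def pvDiffWitness_index_uniq : List Int := [5]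
def pvDiffWitnessOut_index_uniq : (List Int) × (List Int) := ([], [0])

-- ===== CLAIM (what is proved, stated in full; the proofs are below) =====
def Claim_unchanged_index_uniq : Prop := ∀ (a : List Int), Dom_index_uniq a → Spec_index_uniq a (index_uniq a)
def Claim_changed_index_uniq : Prop := Dom_index_uniq (pvDiffWitness_index_uniq) ∧ D_index_uniq (pvDiffWitness_index_uniq) ∧ index_uniq (pvDiffWitness_index_uniq) = pvDiffWitnessOut_index_uniq.1 ∧ index_uniq_alt (pvDiffWitness_index_uniq) = pvDiffWitnessOut_index_uniq.2 ∧ pvDiffWitnessOut_index_uniq.1 ≠ pvDiffWitnessOut_index_uniq.2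
def Claim_exact_index_uniq : Prop := ∀ (a : List Int), Dom_index_uniq a → D_index_uniq a → index_uniq a ≠ index_uniq_alt a

-- ===== LEMMAS AND PROOFS =====
-- value at index j (all accesses below are in range)
def gval (a : List Int) (j : Nat) : Int := a.getD j 0
-- run boundary between j and j+1
def qd (a : List Int) (j : Nat) : Bool := decide (gval a (j + 1) ≠ gval a j)
-- B's run-end predicate
def qB (a : List Int) (j : Nat) : Bool := decide (j + 1 = a.length) || qd a j

theorem runEnd_ge (a : List Int) (fuel : Nat) : ∀ j, j ≤ runEnd a fuel j := by
  induction fuel with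
  | zero => intro j; exact le_refl j
  | succ f ih =>
    intro j
    simp only [runEnd]
    split
    · exact le_trans (Nat.le_succ j) (ih (j + 1))
    · exact le_refl j

theorem runEnd_lt (a : List Int) (fuel : Nat) : ∀ j, j < a.length → runEnd a fuel j < a.length := by
  induction fuel with
  | zero => intro j h; exact h
  | succ f ih =>
    intro j h
    simp only [runEnd]
    split
    · next hc => exact ih (j + 1) hc.1
    · exact h

theorem runEnd_mid (a : List Int) (fuel : Nat) :
    ∀ i k, i ≤ k → k < runEnd a fuel i → k + 1 < a.length ∧ gval a (k + 1) = gval a k := by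
  induction fuel with
  | zero => intro i k hik hk; simp only [runEnd] at hk; omega
  | succ f ih =>
    intro i k hik hk
    simp only [runEnd] at hk
    by_cases hc : i + 1 < a.length ∧ a.getD (i + 1) 0 = a.getD i 0
    · rw [if_pos hc] at hk
      rcases Nat.eq_or_lt_of_le hik with heq | hlt
      · subst heq; exact hc
      · exact ih (i + 1) k hlt hk
    · rw [if_neg hc] at hk; omega

theorem runEnd_stop (a : List Int) (fuel : Nat) :
    ∀ i, a.length ≤ fuel + i →
      ¬ (runEnd a fuel i + 1 < a.length ∧ gval a (runEnd a fuel i + 1) = gval a (runEnd a fuel i)) := by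
  induction fuel with
  | zero => intro i hf; simp only [runEnd]; omega
  | succ f ih =>
    intro i hf
    simp only [runEnd]
    split
    · next hc => exact ih (i + 1) (by omega)
    · next hc => exact hc

-- B's outer loop produces exactly the indices whose run ends there
theorem loopB_eq (a : List Int) (fuel : Nat) :
    ∀ i, a.length ≤ fuel + i →
      loopB a fuel i = ((List.range' i (a.length - i)).filter (qB a)).map Int.ofNat := by
  induction fuel with
  | zero =>
    intro i hf
    have h0 : a.length - i = 0 := by omega
    rw [h0]
    rfl
  | succ f ih =>
    intro i hf
    simp only [loopB]
    by_cases h : i < a.length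
    · rw [if_pos h]
      have hij : i ≤ runEnd a a.length i := runEnd_ge a a.length i
      have hjn : runEnd a a.length i < a.length := runEnd_lt a a.length i h
      have hstop := runEnd_stop a a.length i (by omega)
      have e2 : (runEnd a a.length i - i) + (a.length - runEnd a a.length i) = a.length - i := by
        omega
      have e1 : i + 1 * (runEnd a a.length i - i) = runEnd a a.length i := by omega
      rw [← e2, ← List.range'_append, e1, List.filter_append]
      have h2 : List.filter (qB a) (List.range' i (runEnd a a.length i - i) 1) = [] := by
        rw [List.filter_eq_nil_iff]
        intro k hk
        rw [List.mem_range'_1] at hk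
        obtain ⟨hlt, heq⟩ := runEnd_mid a a.length i k hk.1 (by omega)
        simp only [qB, qd, Bool.or_eq_true, decide_eq_true_eq]
        rintro (hor | hor)
        · omega
        · exact hor heq
      rw [h2]
      have h3 : a.length - runEnd a a.length i = (a.length - (runEnd a a.length i + 1)) + 1 := by
        omega
      rw [h3, List.range'_succ]
      have hpj : qB a (runEnd a a.length i) = true := by
        by_cases hn : runEnd a a.length i + 1 = a.length
        · simp only [qB, Bool.or_eq_true, decide_eq_true_eq]
          exact Or.inl hn
        · have hlt : runEnd a a.length i + 1 < a.length := by omega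
          have hne : gval a (runEnd a a.length i + 1) ≠ gval a (runEnd a a.length i) :=
            fun he => hstop ⟨hlt, he⟩
          simp only [qB, qd, Bool.or_eq_true, decide_eq_true_eq]
          exact Or.inr hne
      rw [List.filter_cons, if_pos hpj, List.nil_append, List.map_cons,
          ih (runEnd a a.length i + 1) (by omega)]
    · rw [if_neg h, Nat.sub_eq_zero_of_le (Nat.le_of_not_lt h)]
      rfl

-- the two pieces A appends at step t (after resolving the identity index list)
def dpart (a : List Int) (t : Nat) : List Int :=
  if gval a t ≠ gval a (t - 1) then [Int.ofNat (t - 1)] else []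
def lpart (a : List Int) (t : Nat) : List Int :=
  if t = a.length - 1 then [Int.ofNat t] else []

theorem loopA_eq (a : List Int) (fuel : Nat) :
    ∀ b acc, 1 ≤ b → a.length ≤ fuel + b →
    loopA a ((List.range a.length).map Int.ofNat) fuel b acc
      = acc ++ (List.range' b (a.length - b)).flatMap (fun t => dpart a t ++ lpart a t) := by
  induction fuel with
  | zero =>
    intro b acc hb hf
    have h0 : a.length - b = 0 := by omega
    rw [h0]
    simp only [loopA, List.range'_zero, List.flatMap_nil, List.append_nil]
  | succ f ih =>
    intro b acc hb hf
    simp only [loopA]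
    by_cases h : b < a.length
    · rw [if_pos h]
      have hb1 : ((b : Int) - 1) = ((b - 1 : Nat) : Int) := by omega
      have hgb : PySem.List.pyGetD a (b : Int) 0 = gval a b := by
        rw [PySem.List.pyGetD_natCast]; rfl
      have hgb1 : PySem.List.pyGetD a ((b : Int) - 1) 0 = gval a (b - 1) := by
        rw [hb1, PySem.List.pyGetD_natCast]; rfl
      have hib : PySem.List.pyGetD ((List.range a.length).map Int.ofNat) (b : Int) 0
          = Int.ofNat b := by
        rw [PySem.List.pyGetD_natCast, PySem.List.getD_map_range Int.ofNat a.length b 0 h]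
      have hib1 : PySem.List.pyGetD ((List.range a.length).map Int.ofNat) ((b : Int) - 1) 0
          = Int.ofNat (b - 1) := by
        rw [hb1, PySem.List.pyGetD_natCast,
            PySem.List.getD_map_range Int.ofNat a.length (b - 1) 0 (by omega)]
      rw [hgb, hgb1, hib, hib1]
      have hr : a.length - b = (a.length - (b + 1)) + 1 := by omega
      rw [hr, List.range'_succ, List.flatMap_cons]
      by_cases h1 : gval a b ≠ gval a (b - 1) <;> by_cases h2 : b = a.length - 1
      · simp only [if_pos h1, if_pos h2]
        rw [ih (b + 1) _ (by omega) (by omega), dpart, lpart, if_pos h1, if_pos h2]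
        simp [List.append_assoc]
      · simp only [if_pos h1, if_neg h2]
        rw [ih (b + 1) _ (by omega) (by omega), dpart, lpart, if_pos h1, if_neg h2]
        simp [List.append_assoc]
      · simp only [if_neg h1, if_pos h2]
        rw [ih (b + 1) _ (by omega) (by omega), dpart, lpart, if_neg h1, if_pos h2]
        simp [List.append_assoc]
      · simp only [if_neg h1, if_neg h2]
        rw [ih (b + 1) _ (by omega) (by omega), dpart, lpart, if_neg h1, if_neg h2]
        simp
    · have h0 : a.length - b = 0 := by omega
      rw [if_neg h, h0]
      simp

theorem flatMap_congr_mem {α β : Type} {l : List α} {f g : α → List β}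
    (h : ∀ x ∈ l, f x = g x) : l.flatMap f = l.flatMap g := by
  induction l with
  | nil => rfl
  | cons x xs ih =>
    simp only [List.flatMap_cons]
    rw [h x (List.mem_cons_self), ih (fun y hy => h y (List.mem_cons_of_mem x hy))]

-- shifting A's contributions by one turns them into a filter over run boundaries
theorem flat_dpart (a : List Int) (s len : Nat) :
    (List.range' (s + 1) len).flatMap (dpart a)
      = ((List.range' s len).filter (qd a)).map Int.ofNat := by
  induction len generalizing s with
  | zero => rfl
  | succ m ih =>
    rw [List.range'_succ, List.range'_succ, List.flatMap_cons, List.filter_cons]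
    have hss : s + 1 - 1 = s := by omega
    by_cases h : gval a (s + 1) = gval a s
    · rw [dpart, hss, if_neg (not_not_intro h),
          if_neg (by simp only [qd, decide_eq_true_eq]; exact not_not_intro h),
          List.nil_append, ih (s + 1)]
    · rw [dpart, hss, if_pos h,
          if_pos (by simp only [qd, decide_eq_true_eq]; exact h),
          List.map_cons, List.singleton_append, ih (s + 1)]

-- A on lists of length ≥ 2, in boundary-filter form
theorem indexA_eq (a : List Int) (h2 : 2 ≤ a.length) :
    index_uniq a
      = ((List.range' 0 (a.length - 1)).filter (qd a)).map Int.ofNat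
        ++ [Int.ofNat (a.length - 1)] := by
  rw [index_uniq]
  have hidx : (PySem.List.pyRange 0 (a.length : Int) 1).foldl (fun acc b => acc ++ [b]) []
      = (List.range a.length).map Int.ofNat := by
    rw [show (fun (acc : List Int) (b : Int) => acc ++ [b])
          = fun (acc : List Int) (b : Int) => acc ++ [id b] from rfl,
        PySem.List.foldl_append_singleton_eq_map]
    simp [PySem.List.pyRange_one, List.map_map]
  rw [hidx, loopA_eq a a.length 1 [] le_rfl (by omega), List.nil_append]
  have hsplit : List.range' 1 (a.length - 1) = List.range' 1 (a.length - 2) ++ [a.length - 1] := by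
    have h1 : a.length - 1 = (a.length - 2) + 1 := by omega
    rw [h1, List.range'_concat]
    have h2' : 1 + 1 * (a.length - 2) = a.length - 2 + 1 := by omega
    rw [h2']
  rw [hsplit, List.flatMap_append]
  have hmid : (List.range' 1 (a.length - 2)).flatMap (fun t => dpart a t ++ lpart a t)
      = (List.range' 1 (a.length - 2)).flatMap (dpart a) := by
    apply flatMap_congr_mem
    intro t ht
    rw [List.mem_range'_1] at ht
    have hne : t ≠ a.length - 1 := by omega
    rw [lpart, if_neg hne, List.append_nil]
  have hlast : List.flatMap (fun t => dpart a t ++ lpart a t) [a.length - 1]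
      = dpart a (a.length - 1) ++ [Int.ofNat (a.length - 1)] := by
    rw [List.flatMap_cons, List.flatMap_nil, List.append_nil, lpart, if_pos rfl]
  rw [hmid, hlast, ← List.append_assoc]
  have hfold : (List.range' 1 (a.length - 2)).flatMap (dpart a) ++ dpart a (a.length - 1)
      = (List.range' 1 (a.length - 1)).flatMap (dpart a) := by
    rw [hsplit, List.flatMap_append, List.flatMap_cons, List.flatMap_nil, List.append_nil]
  rw [hfold]
  have h01 : (0 : Nat) + 1 = 1 := rfl
  rw [← h01, flat_dpart a 0 (a.length - 1)]

-- B on nonempty lists, in the same form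
theorem indexB_eq (a : List Int) (h1 : 1 ≤ a.length) :
    index_uniq_alt a
      = ((List.range' 0 (a.length - 1)).filter (qd a)).map Int.ofNat
        ++ [Int.ofNat (a.length - 1)] := by
  rw [index_uniq_alt, loopB_eq a a.length 0 (by omega), Nat.sub_zero]
  have hsplit : List.range' 0 a.length = List.range' 0 (a.length - 1) ++ [a.length - 1] := by
    have h : a.length = (a.length - 1) + 1 := by omega
    nth_rewrite 1 [h]
    rw [List.range'_concat]
    have h2' : 0 + 1 * (a.length - 1) = a.length - 1 := by omega
    rw [h2']
  rw [hsplit, List.filter_append]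
  have hq : qB a (a.length - 1) = true := by
    simp only [qB, Bool.or_eq_true, decide_eq_true_eq]
    exact Or.inl (by omega)
  have hlast : List.filter (qB a) [a.length - 1] = [a.length - 1] := by
    rw [List.filter_cons, if_pos hq, List.filter_nil]
  rw [hlast]
  have hcong : List.filter (qB a) (List.range' 0 (a.length - 1))
      = List.filter (qd a) (List.range' 0 (a.length - 1)) := by
    apply List.filter_congr
    intro j hj
    rw [List.mem_range'_1] at hj
    have hne : j + 1 ≠ a.length := by omega
    simp [qB, hne]
  rw [hcong, List.map_append]
  rfl

-- ===== VERDICT (by name: the statement is the Claim_ definition above) =====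
theorem index_uniq_spec : Claim_unchanged_index_uniq := by
  intro a _ hnD
  show index_uniq a = index_uniq_alt a
  by_cases h0 : a.length = 0
  · have ha : a = [] := List.eq_nil_of_length_eq_zero h0
    subst ha
    rfl
  · have h2 : 2 ≤ a.length := by
      unfold D_index_uniq at hnD
      omega
    rw [indexA_eq a h2, indexB_eq a (by omega)]
theorem index_uniq_changed : Claim_changed_index_uniq := by
  unfold Claim_changed_index_uniq
  decide
theorem index_uniq_tight : Claim_exact_index_uniq := by
  intro a _ hD
  unfold D_index_uniq at hD
  match a, hD with
  | [x], _ =>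
    have hA : index_uniq [x] = [] := rfl
    have hB : index_uniq_alt [x] = [0] := rfl
    rw [hA, hB]
    simp
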